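-- pv_equiv track=rewrite | github.com/lcswnn/ControlledBurn | conditions.py | determine_verdict
-- ===== SOURCE A (Python) =====
-- CRITICAL_CONDITIONS = {"Red Flag Warning", "Wind", "Humidity", "Air Quality"}
--
-- def determine_verdict(core_conditions, burn_score=None):
--     """Return 'ok', 'caution', or 'fail' using tiered condition logic.
--
--     Parameters
--     ----------
--     core_conditions : list of (label, (value, severity, message))
--     burn_score : int or None — if provided, used as a secondary gate
--
--     Returns
--     -------
--     str : 'ok' | 'caution' | 'fail'
--     """
--     critical_severities = []
--     secondary_severities = []
--
--     for label, cond in core_conditions: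
--         sev = cond[1]
--         if label in CRITICAL_CONDITIONS:
--             critical_severities.append(sev)
--         else:
--             secondary_severities.append(sev)
--
--     # Any critical fail → hard fail
--     if "fail" in critical_severities:
--         return "fail"
--
--     # Count secondary fails
--     secondary_fails = secondary_severities.count("fail")
--
--     # 2+ secondary fails → fail
--     if secondary_fails >= 2:
--         return "fail"
--
--     # 1 secondary fail → caution
--     if secondary_fails == 1:
--         verdict = "caution"
--     elif "caution" in critical_severities or "caution" in secondary_severities:
--         verdict = "caution"
--     else:
--         verdict = "ok"
--
--     # Score-based secondary gate
--     if burn_score is not None: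
--         if burn_score < 50:
--             return "fail"
--         if burn_score < 75 and verdict == "ok":
--             return "caution"
--
--     return verdict
-- ===== SOURCE B (Python) =====
-- CRITICAL_CONDITIONS = {"Red Flag Warning", "Wind", "Humidity", "Air Quality"}
--
-- def determine_verdict(core_conditions, burn_score=None):
--     """Severity-lattice formulation: each condition maps to a numeric level
--     (critical fail -> 2, any caution or a secondary fail -> 1, else 0); the
--     base verdict is the max level over all conditions, promoted to 2 when
--     two or more secondary fails occur; the same burn_score gate follows."""
--     def level_of(label, cond):
--         sev = cond[1]
--         if label in CRITICAL_CONDITIONS: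
--             return 2 if sev == "fail" else (1 if sev == "caution" else 0)
--         return 1 if sev in ("fail", "caution") else 0
--
--     level = max((level_of(l, c) for l, c in core_conditions), default=0)
--     if level < 2 and sum(1 for l, c in core_conditions
--                          if l not in CRITICAL_CONDITIONS and c[1] == "fail") >= 2:
--         level = 2
--     if level == 2:
--         return "fail"
--     if burn_score is not None:
--         if burn_score < 50:
--             return "fail"
--         if burn_score < 75 and level == 0:
--             return "caution"
--     return ("ok", "caution")[level]
-- ===== Notes on version B (the rewrite author's own statement) =====
-- stated objective: alternative
-- what changed: B replaces A's partition-into-two-severity-lists-then-rescan logic with a severity lattice: each condition is mapped to a numeric level (critical fail=2, any caution or a secondary fail=1), the verdict is the max level over conditions, promoted to 2 when at least two secondary fails are counted, then the same burn_score gate is applied to the numeric level.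
import Mathlib
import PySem

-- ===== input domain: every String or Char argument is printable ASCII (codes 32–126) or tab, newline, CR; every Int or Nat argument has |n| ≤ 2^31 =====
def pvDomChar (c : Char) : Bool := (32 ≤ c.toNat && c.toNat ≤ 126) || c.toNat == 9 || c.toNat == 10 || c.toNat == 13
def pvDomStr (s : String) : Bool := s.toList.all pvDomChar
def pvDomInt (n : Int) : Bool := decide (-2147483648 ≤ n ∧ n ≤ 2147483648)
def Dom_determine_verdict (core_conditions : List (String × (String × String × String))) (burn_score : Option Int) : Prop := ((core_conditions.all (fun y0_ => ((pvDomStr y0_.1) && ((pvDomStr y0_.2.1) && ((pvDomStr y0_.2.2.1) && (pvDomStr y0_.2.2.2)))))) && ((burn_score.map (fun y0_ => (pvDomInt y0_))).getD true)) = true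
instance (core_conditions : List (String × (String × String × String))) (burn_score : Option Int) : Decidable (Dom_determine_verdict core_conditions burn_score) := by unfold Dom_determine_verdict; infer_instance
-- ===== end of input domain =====

-- B recasts A's list-partition-and-rescan logic as a severity lattice: each
-- condition maps to a numeric level, the verdict is the max level (promoted
-- on two secondary fails). (objective: alternative)

-- ===== PORT A =====
-- module constant CRITICAL_CONDITIONS (a set of labels; membership test only)
def criticalConditions : List String := ["Red Flag Warning", "Wind", "Humidity", "Air Quality"]

def determine_verdict (core_conditions : List (String × (String × String × String))) (burn_score : Option Int) : String :=
  -- the for-loop building critical_severities / secondary_severities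
  let lists := core_conditions.foldl
    (fun (acc : List String × List String) p =>
      let sev := p.2.2.1
      if criticalConditions.contains p.1 then (acc.1 ++ [sev], acc.2)
      else (acc.1, acc.2 ++ [sev]))
    ([], [])
  let critical_severities := lists.1
  let secondary_severities := lists.2
  if critical_severities.contains "fail" then "fail"
  else
    let secondary_fails := PySem.List.count secondary_severities "fail"
    if secondary_fails ≥ 2 then "fail"
    else
      let verdict :=
        if secondary_fails == 1 then "caution"
        else if critical_severities.contains "caution" || secondary_severities.contains "caution" then "caution"
        else "ok"
      match burn_score with
      | some bs =>
        if bs < 50 then "fail"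
        else if bs < 75 && verdict == "ok" then "caution"
        else verdict
      | none => verdict

-- ===== PORT B =====
-- helper level_of from Source B
def levelOf (p : String × (String × String × String)) : Int :=
  let sev := p.2.2.1
  if criticalConditions.contains p.1 then
    if sev == "fail" then 2 else if sev == "caution" then 1 else 0
  else if sev == "fail" || sev == "caution" then 1 else 0

def determine_verdict_alt (core_conditions : List (String × (String × String × String))) (burn_score : Option Int) : String :=
  -- max(generator, default=0)
  let level := (core_conditions.map levelOf).foldl max 0
  -- sum(1 for ... if secondary fail)
  let sf : Int := (core_conditions.filter (fun p => !criticalConditions.contains p.1 && p.2.2.1 == "fail")).length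
  let level := if level < 2 && sf ≥ 2 then (2 : Int) else level
  if level == 2 then "fail"
  else
    match burn_score with
    | some bs =>
      if bs < 50 then "fail"
      else if bs < 75 && level == 0 then "caution"
      else if level == 0 then "ok" else "caution"   -- ("ok","caution")[level]
    | none => if level == 0 then "ok" else "caution"

-- ===== PRECONDITION & SPEC =====
def Spec_determine_verdict (core_conditions : List (String × (String × String × String))) (burn_score : Option Int) (out : String) : Prop := out = determine_verdict_alt core_conditions burn_score
instance (core_conditions : List (String × (String × String × String))) (burn_score : Option Int) (out : String) : Decidable (Spec_determine_verdict core_conditions burn_score out) := by unfold Spec_determine_verdict; infer_instance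

-- ===== CLAIM (what is proved, stated in full; the proofs are below) =====
def Claim_equal_determine_verdict : Prop := ∀ (core_conditions : List (String × (String × String × String))) (burn_score : Option Int), Dom_determine_verdict core_conditions burn_score → Spec_determine_verdict core_conditions burn_score (determine_verdict core_conditions burn_score)

-- ===== LEMMAS AND PROOFS =====

-- proof-only helpers: A's loop body named, and the severity lists A
-- accumulates, as filter/map
def stepA (acc : List String × List String) (p : String × (String × String × String)) :
    List String × List String :=
  if criticalConditions.contains p.1 then (acc.1 ++ [p.2.2.1], acc.2)
  else (acc.1, acc.2 ++ [p.2.2.1])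

def critSevs (cs : List (String × (String × String × String))) : List String :=
  (cs.filter (fun p => criticalConditions.contains p.1)).map (fun p => p.2.2.1)

def secSevs (cs : List (String × (String × String × String))) : List String :=
  (cs.filter (fun p => !criticalConditions.contains p.1)).map (fun p => p.2.2.1)

-- the closed form of B's max-fold
def pureLevel (cs : List (String × (String × String × String))) : Int :=
  if (critSevs cs).contains "fail" then 2
  else if (critSevs cs).contains "caution" || (secSevs cs).contains "fail" || (secSevs cs).contains "caution" then 1
  else 0

theorem A_fold (cs : List (String × (String × String × String))) (l1 l2 : List String) :
    cs.foldl stepA (l1, l2) = (l1 ++ critSevs cs, l2 ++ secSevs cs) := by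
  induction cs generalizing l1 l2 with
  | nil => simp [critSevs, secSevs]
  | cons hd tl ih =>
    rw [List.foldl_cons]
    by_cases hc : hd.1 ∈ criticalConditions
    · rw [show stepA (l1, l2) hd = (l1 ++ [hd.2.2.1], l2) from by simp [stepA, hc], ih]
      simp [critSevs, secSevs, hc]
    · rw [show stepA (l1, l2) hd = (l1, l2 ++ [hd.2.2.1]) from by simp [stepA, hc], ih]
      simp [critSevs, secSevs, hc]

theorem pureLevel_nonneg (cs : List (String × (String × String × String))) : 0 ≤ pureLevel cs := by
  unfold pureLevel; split_ifs <;> omega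

theorem critSevs_cons (hd : String × (String × String × String))
    (tl : List (String × (String × String × String))) :
    critSevs (hd :: tl)
      = if criticalConditions.contains hd.1 then hd.2.2.1 :: critSevs tl else critSevs tl := by
  by_cases hc : hd.1 ∈ criticalConditions <;> simp [critSevs, hc]

theorem secSevs_cons (hd : String × (String × String × String))
    (tl : List (String × (String × String × String))) :
    secSevs (hd :: tl)
      = if criticalConditions.contains hd.1 then secSevs tl else hd.2.2.1 :: secSevs tl := by
  by_cases hc : hd.1 ∈ criticalConditions <;> simp [secSevs, hc]

theorem max_pureLevel_cons (hd : String × (String × String × String))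
    (tl : List (String × (String × String × String))) :
    max (levelOf hd) (pureLevel tl) = pureLevel (hd :: tl) := by
  by_cases h1 : "fail" ∈ critSevs tl <;>
    by_cases h2 : "caution" ∈ critSevs tl <;>
    by_cases h3 : "fail" ∈ secSevs tl <;>
    by_cases h4 : "caution" ∈ secSevs tl <;>
    by_cases hc : hd.1 ∈ criticalConditions
  all_goals (
    by_cases hf : hd.2.2.1 = "fail"
    · simp [levelOf, pureLevel, critSevs_cons, secSevs_cons, hc, hf, h1, h2, h3, h4]
    · by_cases hca : hd.2.2.1 = "caution"
      · simp [levelOf, pureLevel, critSevs_cons, secSevs_cons, hc, hca, h1, h2, h3, h4]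
      · simp [levelOf, pureLevel, critSevs_cons, secSevs_cons, hc, hf, hca,
          Ne.symm hf, Ne.symm hca, h1, h2, h3, h4])

theorem B_level (cs : List (String × (String × String × String))) (m : Int) (hm : 0 ≤ m) :
    (cs.map levelOf).foldl max m = max m (pureLevel cs) := by
  induction cs generalizing m with
  | nil =>
    simp [pureLevel, critSevs, secSevs]
    omega
  | cons hd tl ih =>
    rw [List.map_cons, List.foldl_cons, ih (max m (levelOf hd)) (le_trans hm (le_max_left _ _)),
      max_assoc, max_pureLevel_cons]

theorem B_sf (cs : List (String × (String × String × String))) :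
    (cs.filter (fun p => !criticalConditions.contains p.1 && p.2.2.1 == "fail")).length
      = List.count "fail" (secSevs cs) := by
  induction cs with
  | nil => simp [secSevs]
  | cons hd tl ih =>
    by_cases hc : hd.1 ∈ criticalConditions
    · simp [secSevs, hc] at *
      exact ih
    · by_cases hf : hd.2.2.1 = "fail"
      · simp [secSevs, hc, hf] at *
        omega
      · have hfb : ("fail" == hd.2.2.1) = false := by simp [Ne.symm hf]
        simp [secSevs, hc, hf, hfb] at *
        exact ih

-- ===== VERDICT (by name: the statement is the Claim_ definition above) =====
theorem determine_verdict_spec : Claim_equal_determine_verdict := by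
  intro cs bs _
  unfold Spec_determine_verdict determine_verdict determine_verdict_alt
  rw [show (fun (acc : List String × List String) (p : String × (String × String × String)) =>
        let sev := p.2.2.1
        if criticalConditions.contains p.1 then (acc.1 ++ [sev], acc.2)
        else (acc.1, acc.2 ++ [sev])) = stepA from rfl,
      A_fold cs [] [], B_level cs 0 le_rfl]
  have hsf' : ((cs.filter (fun p => !criticalConditions.contains p.1 && p.2.2.1 == "fail")).length : Int)
      = ((List.count "fail" (secSevs cs) : Nat) : Int) := by exact_mod_cast B_sf cs
  simp only [List.nil_append, max_eq_right (pureLevel_nonneg cs), hsf']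
  by_cases cf : "fail" ∈ critSevs cs
  · simp [pureLevel, cf]
  · have hmem : ("fail" ∈ secSevs cs) ↔ 0 < List.count "fail" (secSevs cs) :=
      (List.count_pos_iff).symm
    by_cases cc : "caution" ∈ critSevs cs <;>
      by_cases sc : "caution" ∈ secSevs cs <;>
      rcases hk : List.count "fail" (secSevs cs) with _ | _ | k <;>
      cases bs <;>
      simp [pureLevel, cf, cc, sc, hk, hmem, PySem.List.count]
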